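-- pv_equiv track=rewrite | github.com/NJ-GT/NJT-PJT | 0429/koreanize_living_population_columns.py | korean_name
-- ===== SOURCE A (Python) =====
-- HOUR_PREFIX = {
--     "ZERO": 0,
--     "ONE": 1,
--     "TWO": 2,
--     "THREE": 3,
--     "FOUR": 4,
--     "FIVE": 5,
--     "SIX": 6,
--     "SEVEN": 7,
--     "EIGHT": 8,
--     "NINE": 9,
--     "TEN": 10,
--     "ELEVEN": 11,
--     "TLV": 12,
--     "THIRTEEN": 13,
--     "FOURTEEN": 14,
--     "FFTN": 15,
--     "SXTN": 16,
--     "SVNTN": 17,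
--     "EGHTN": 18,
--     "NNTN": 19,
--     "TWNT": 20,
--     "TNT": 20,
--     "TNONE": 21,
--     "TNTONE": 21,
--     "TNTT": 22,
--     "TNTTH": 23,
-- }
--
-- BASE_RENAME = {
--     "source_file": "원본파일명",
--     "source_ym": "파일기준년월",
--     "TRDAR_NO": "상권번호",
--     "TRDAR_NM": "상권명",
--     "SIGNGU_CD": "시군구코드",
--     "SIGNGU_NM": "시군구명",
--     "GRFA_SM": "총면적",
--     "RSDNTL_BULD_GRFA": "주거건물면적",
--     "RSDNTL_BULD_EXCL_GRFA": "비주거건물제외면적",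
--     "MOAV_STPRD_FRNR_LVLH_POPNO": "월평균_외국인_상주생활인구수",
--     "MOAV_STPRD_FRNR_VST_POPNO": "월평균_외국인_방문생활인구수",
--     "TRDAR_CRDT_CONT": "상권좌표내용",
--     "TRDAR_CRDNT_CONT": "상권좌표내용",
--     "DATA_STRD_YM": "데이터기준년월",
-- }
--
-- def korean_name(col: str) -> str:
--     if col in BASE_RENAME:
--         return BASE_RENAME[col]
--
--     for prefix, hour in HOUR_PREFIX.items():
--         living = f"{prefix}_TIZN_STPRD_FRNR_LVLH_POPNO"
--         visiting = f"{prefix}_TIZN_STPRD_FRNR_VST_POPNO"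
--         if col == living:
--             return f"{hour:02d}시_외국인_상주생활인구수"
--         if col == visiting:
--             return f"{hour:02d}시_외국인_방문생활인구수"
--
--     return col
-- ===== SOURCE B (Python) =====
-- # Precomputed full rename table: every hour-prefix column name is tabulated once,
-- # so lookup is a single dict access.
-- RENAME = {
--     "source_file": "원본파일명",
--     "source_ym": "파일기준년월",
--     "TRDAR_NO": "상권번호",
--     "TRDAR_NM": "상권명",
--     "SIGNGU_CD": "시군구코드",
--     "SIGNGU_NM": "시군구명",
--     "GRFA_SM": "총면적",
--     "RSDNTL_BULD_GRFA": "주거건물면적",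
--     "RSDNTL_BULD_EXCL_GRFA": "비주거건물제외면적",
--     "MOAV_STPRD_FRNR_LVLH_POPNO": "월평균_외국인_상주생활인구수",
--     "MOAV_STPRD_FRNR_VST_POPNO": "월평균_외국인_방문생활인구수",
--     "TRDAR_CRDT_CONT": "상권좌표내용",
--     "TRDAR_CRDNT_CONT": "상권좌표내용",
--     "DATA_STRD_YM": "데이터기준년월",
--     "ZERO_TIZN_STPRD_FRNR_LVLH_POPNO": "00시_외국인_상주생활인구수",
--     "ZERO_TIZN_STPRD_FRNR_VST_POPNO": "00시_외국인_방문생활인구수",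
--     "ONE_TIZN_STPRD_FRNR_LVLH_POPNO": "01시_외국인_상주생활인구수",
--     "ONE_TIZN_STPRD_FRNR_VST_POPNO": "01시_외국인_방문생활인구수",
--     "TWO_TIZN_STPRD_FRNR_LVLH_POPNO": "02시_외국인_상주생활인구수",
--     "TWO_TIZN_STPRD_FRNR_VST_POPNO": "02시_외국인_방문생활인구수",
--     "THREE_TIZN_STPRD_FRNR_LVLH_POPNO": "03시_외국인_상주생활인구수",
--     "THREE_TIZN_STPRD_FRNR_VST_POPNO": "03시_외국인_방문생활인구수",
--     "FOUR_TIZN_STPRD_FRNR_LVLH_POPNO": "04시_외국인_상주생활인구수",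
--     "FOUR_TIZN_STPRD_FRNR_VST_POPNO": "04시_외국인_방문생활인구수",
--     "FIVE_TIZN_STPRD_FRNR_LVLH_POPNO": "05시_외국인_상주생활인구수",
--     "FIVE_TIZN_STPRD_FRNR_VST_POPNO": "05시_외국인_방문생활인구수",
--     "SIX_TIZN_STPRD_FRNR_LVLH_POPNO": "06시_외국인_상주생활인구수",
--     "SIX_TIZN_STPRD_FRNR_VST_POPNO": "06시_외국인_방문생활인구수",
--     "SEVEN_TIZN_STPRD_FRNR_LVLH_POPNO": "07시_외국인_상주생활인구수",
--     "SEVEN_TIZN_STPRD_FRNR_VST_POPNO": "07시_외국인_방문생활인구수",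
--     "EIGHT_TIZN_STPRD_FRNR_LVLH_POPNO": "08시_외국인_상주생활인구수",
--     "EIGHT_TIZN_STPRD_FRNR_VST_POPNO": "08시_외국인_방문생활인구수",
--     "NINE_TIZN_STPRD_FRNR_LVLH_POPNO": "09시_외국인_상주생활인구수",
--     "NINE_TIZN_STPRD_FRNR_VST_POPNO": "09시_외국인_방문생활인구수",
--     "TEN_TIZN_STPRD_FRNR_LVLH_POPNO": "10시_외국인_상주생활인구수",
--     "TEN_TIZN_STPRD_FRNR_VST_POPNO": "10시_외국인_방문생활인구수",
--     "ELEVEN_TIZN_STPRD_FRNR_LVLH_POPNO": "11시_외국인_상주생활인구수",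
--     "ELEVEN_TIZN_STPRD_FRNR_VST_POPNO": "11시_외국인_방문생활인구수",
--     "TLV_TIZN_STPRD_FRNR_LVLH_POPNO": "12시_외국인_상주생활인구수",
--     "TLV_TIZN_STPRD_FRNR_VST_POPNO": "12시_외국인_방문생활인구수",
--     "THIRTEEN_TIZN_STPRD_FRNR_LVLH_POPNO": "13시_외국인_상주생활인구수",
--     "THIRTEEN_TIZN_STPRD_FRNR_VST_POPNO": "13시_외국인_방문생활인구수",
--     "FOURTEEN_TIZN_STPRD_FRNR_LVLH_POPNO": "14시_외국인_상주생활인구수",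
--     "FOURTEEN_TIZN_STPRD_FRNR_VST_POPNO": "14시_외국인_방문생활인구수",
--     "FFTN_TIZN_STPRD_FRNR_LVLH_POPNO": "15시_외국인_상주생활인구수",
--     "FFTN_TIZN_STPRD_FRNR_VST_POPNO": "15시_외국인_방문생활인구수",
--     "SXTN_TIZN_STPRD_FRNR_LVLH_POPNO": "16시_외국인_상주생활인구수",
--     "SXTN_TIZN_STPRD_FRNR_VST_POPNO": "16시_외국인_방문생활인구수",
--     "SVNTN_TIZN_STPRD_FRNR_LVLH_POPNO": "17시_외국인_상주생활인구수",
--     "SVNTN_TIZN_STPRD_FRNR_VST_POPNO": "17시_외국인_방문생활인구수",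
--     "EGHTN_TIZN_STPRD_FRNR_LVLH_POPNO": "18시_외국인_상주생활인구수",
--     "EGHTN_TIZN_STPRD_FRNR_VST_POPNO": "18시_외국인_방문생활인구수",
--     "NNTN_TIZN_STPRD_FRNR_LVLH_POPNO": "19시_외국인_상주생활인구수",
--     "NNTN_TIZN_STPRD_FRNR_VST_POPNO": "19시_외국인_방문생활인구수",
--     "TWNT_TIZN_STPRD_FRNR_LVLH_POPNO": "20시_외국인_상주생활인구수",
--     "TWNT_TIZN_STPRD_FRNR_VST_POPNO": "20시_외국인_방문생활인구수",
--     "TNT_TIZN_STPRD_FRNR_LVLH_POPNO": "20시_외국인_상주생활인구수",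
--     "TNT_TIZN_STPRD_FRNR_VST_POPNO": "20시_외국인_방문생활인구수",
--     "TNONE_TIZN_STPRD_FRNR_LVLH_POPNO": "21시_외국인_상주생활인구수",
--     "TNONE_TIZN_STPRD_FRNR_VST_POPNO": "21시_외국인_방문생활인구수",
--     "TNTONE_TIZN_STPRD_FRNR_LVLH_POPNO": "21시_외국인_상주생활인구수",
--     "TNTONE_TIZN_STPRD_FRNR_VST_POPNO": "21시_외국인_방문생활인구수",
--     "TNTT_TIZN_STPRD_FRNR_LVLH_POPNO": "22시_외국인_상주생활인구수",
--     "TNTT_TIZN_STPRD_FRNR_VST_POPNO": "22시_외국인_방문생활인구수",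
--     "TNTTH_TIZN_STPRD_FRNR_LVLH_POPNO": "23시_외국인_상주생활인구수",
--     "TNTTH_TIZN_STPRD_FRNR_VST_POPNO": "23시_외국인_방문생활인구수",
-- }
--
-- def korean_name(col: str) -> str:
--     return RENAME.get(col, col)
-- ===== Notes on version B (the rewrite author's own statement) =====
-- stated objective: idiomatic
-- what changed: Replaced BASE_RENAME lookup plus a 24-iteration loop that builds both candidate hour-column names per prefix and linearly compares, by one precomputed 62-entry rename table and a single dict lookup with default (RENAME.get(col, col)).
import Mathlib
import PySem

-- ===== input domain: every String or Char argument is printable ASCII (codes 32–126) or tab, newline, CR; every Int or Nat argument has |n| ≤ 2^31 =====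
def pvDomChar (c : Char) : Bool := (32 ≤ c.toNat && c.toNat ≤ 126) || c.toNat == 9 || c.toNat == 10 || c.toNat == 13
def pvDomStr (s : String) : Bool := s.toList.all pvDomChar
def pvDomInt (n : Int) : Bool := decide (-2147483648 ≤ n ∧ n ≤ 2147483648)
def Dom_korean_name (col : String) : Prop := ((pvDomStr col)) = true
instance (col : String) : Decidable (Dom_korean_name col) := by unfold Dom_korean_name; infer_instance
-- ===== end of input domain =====

-- B replaces A's BASE_RENAME lookup + 24-iteration candidate-building scan by ONE
-- precomputed 62-entry rename table and a single dict lookup with default (idiomatic).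

-- ===== PORT A =====
-- module-level tables of Source A
def hourPrefixItems : List (String × Int) :=
  [("ZERO", 0), ("ONE", 1), ("TWO", 2), ("THREE", 3), ("FOUR", 4), ("FIVE", 5),
   ("SIX", 6), ("SEVEN", 7), ("EIGHT", 8), ("NINE", 9), ("TEN", 10), ("ELEVEN", 11),
   ("TLV", 12), ("THIRTEEN", 13), ("FOURTEEN", 14), ("FFTN", 15), ("SXTN", 16),
   ("SVNTN", 17), ("EGHTN", 18), ("NNTN", 19), ("TWNT", 20), ("TNT", 20),
   ("TNONE", 21), ("TNTONE", 21), ("TNTT", 22), ("TNTTH", 23)]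

def HOUR_PREFIX : PySem.Dict String Int := PySem.Dict.ofList hourPrefixItems

def BASE_RENAME : PySem.Dict String String := PySem.Dict.ofList
  [("source_file", "원본파일명"),
   ("source_ym", "파일기준년월"),
   ("TRDAR_NO", "상권번호"),
   ("TRDAR_NM", "상권명"),
   ("SIGNGU_CD", "시군구코드"),
   ("SIGNGU_NM", "시군구명"),
   ("GRFA_SM", "총면적"),
   ("RSDNTL_BULD_GRFA", "주거건물면적"),
   ("RSDNTL_BULD_EXCL_GRFA", "비주거건물제외면적"),
   ("MOAV_STPRD_FRNR_LVLH_POPNO", "월평균_외국인_상주생활인구수"),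
   ("MOAV_STPRD_FRNR_VST_POPNO", "월평균_외국인_방문생활인구수"),
   ("TRDAR_CRDT_CONT", "상권좌표내용"),
   ("TRDAR_CRDNT_CONT", "상권좌표내용"),
   ("DATA_STRD_YM", "데이터기준년월")]

-- f"{h:02d}" hand-ported: zero-pad str(h) to width 2 (exact for the table's hours 0..23)
def fmt02 (h : Int) : String :=
  let s := PySem.Int.toStr h
  if PySem.Str.len s < 2 then "0" ++ s else s

-- the 'for prefix, hour in HOUR_PREFIX.items():' loop
def koreanGoA (col : String) : List (String × Int) → String
  | [] => col
  | (pfx, hour) :: rest =>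
    let living := pfx ++ "_TIZN_STPRD_FRNR_LVLH_POPNO"
    let visiting := pfx ++ "_TIZN_STPRD_FRNR_VST_POPNO"
    if col = living then fmt02 hour ++ "시_외국인_상주생활인구수"
    else if col = visiting then fmt02 hour ++ "시_외국인_방문생활인구수"
    else koreanGoA col rest

def korean_name (col : String) : String :=
  -- 'if col in BASE_RENAME: return BASE_RENAME[col]' = first-match lookup
  match BASE_RENAME.get? col with
  | some v => v
  | none => koreanGoA col HOUR_PREFIX.items

-- ===== PORT B =====
-- Source B's single precomputed table, written out literally as in Source B
def RENAME_pairs : List (String × String) :=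
  [("source_file", "원본파일명"),
   ("source_ym", "파일기준년월"),
   ("TRDAR_NO", "상권번호"),
   ("TRDAR_NM", "상권명"),
   ("SIGNGU_CD", "시군구코드"),
   ("SIGNGU_NM", "시군구명"),
   ("GRFA_SM", "총면적"),
   ("RSDNTL_BULD_GRFA", "주거건물면적"),
   ("RSDNTL_BULD_EXCL_GRFA", "비주거건물제외면적"),
   ("MOAV_STPRD_FRNR_LVLH_POPNO", "월평균_외국인_상주생활인구수"),
   ("MOAV_STPRD_FRNR_VST_POPNO", "월평균_외국인_방문생활인구수"),
   ("TRDAR_CRDT_CONT", "상권좌표내용"),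
   ("TRDAR_CRDNT_CONT", "상권좌표내용"),
   ("DATA_STRD_YM", "데이터기준년월"),
   ("ZERO_TIZN_STPRD_FRNR_LVLH_POPNO", "00시_외국인_상주생활인구수"),
   ("ZERO_TIZN_STPRD_FRNR_VST_POPNO", "00시_외국인_방문생활인구수"),
   ("ONE_TIZN_STPRD_FRNR_LVLH_POPNO", "01시_외국인_상주생활인구수"),
   ("ONE_TIZN_STPRD_FRNR_VST_POPNO", "01시_외국인_방문생활인구수"),
   ("TWO_TIZN_STPRD_FRNR_LVLH_POPNO", "02시_외국인_상주생활인구수"),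
   ("TWO_TIZN_STPRD_FRNR_VST_POPNO", "02시_외국인_방문생활인구수"),
   ("THREE_TIZN_STPRD_FRNR_LVLH_POPNO", "03시_외국인_상주생활인구수"),
   ("THREE_TIZN_STPRD_FRNR_VST_POPNO", "03시_외국인_방문생활인구수"),
   ("FOUR_TIZN_STPRD_FRNR_LVLH_POPNO", "04시_외국인_상주생활인구수"),
   ("FOUR_TIZN_STPRD_FRNR_VST_POPNO", "04시_외국인_방문생활인구수"),
   ("FIVE_TIZN_STPRD_FRNR_LVLH_POPNO", "05시_외국인_상주생활인구수"),
   ("FIVE_TIZN_STPRD_FRNR_VST_POPNO", "05시_외국인_방문생활인구수"),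
   ("SIX_TIZN_STPRD_FRNR_LVLH_POPNO", "06시_외국인_상주생활인구수"),
   ("SIX_TIZN_STPRD_FRNR_VST_POPNO", "06시_외국인_방문생활인구수"),
   ("SEVEN_TIZN_STPRD_FRNR_LVLH_POPNO", "07시_외국인_상주생활인구수"),
   ("SEVEN_TIZN_STPRD_FRNR_VST_POPNO", "07시_외국인_방문생활인구수"),
   ("EIGHT_TIZN_STPRD_FRNR_LVLH_POPNO", "08시_외국인_상주생활인구수"),
   ("EIGHT_TIZN_STPRD_FRNR_VST_POPNO", "08시_외국인_방문생활인구수"),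
   ("NINE_TIZN_STPRD_FRNR_LVLH_POPNO", "09시_외국인_상주생활인구수"),
   ("NINE_TIZN_STPRD_FRNR_VST_POPNO", "09시_외국인_방문생활인구수"),
   ("TEN_TIZN_STPRD_FRNR_LVLH_POPNO", "10시_외국인_상주생활인구수"),
   ("TEN_TIZN_STPRD_FRNR_VST_POPNO", "10시_외국인_방문생활인구수"),
   ("ELEVEN_TIZN_STPRD_FRNR_LVLH_POPNO", "11시_외국인_상주생활인구수"),
   ("ELEVEN_TIZN_STPRD_FRNR_VST_POPNO", "11시_외국인_방문생활인구수"),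
   ("TLV_TIZN_STPRD_FRNR_LVLH_POPNO", "12시_외국인_상주생활인구수"),
   ("TLV_TIZN_STPRD_FRNR_VST_POPNO", "12시_외국인_방문생활인구수"),
   ("THIRTEEN_TIZN_STPRD_FRNR_LVLH_POPNO", "13시_외국인_상주생활인구수"),
   ("THIRTEEN_TIZN_STPRD_FRNR_VST_POPNO", "13시_외국인_방문생활인구수"),
   ("FOURTEEN_TIZN_STPRD_FRNR_LVLH_POPNO", "14시_외국인_상주생활인구수"),
   ("FOURTEEN_TIZN_STPRD_FRNR_VST_POPNO", "14시_외국인_방문생활인구수"),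
   ("FFTN_TIZN_STPRD_FRNR_LVLH_POPNO", "15시_외국인_상주생활인구수"),
   ("FFTN_TIZN_STPRD_FRNR_VST_POPNO", "15시_외국인_방문생활인구수"),
   ("SXTN_TIZN_STPRD_FRNR_LVLH_POPNO", "16시_외국인_상주생활인구수"),
   ("SXTN_TIZN_STPRD_FRNR_VST_POPNO", "16시_외국인_방문생활인구수"),
   ("SVNTN_TIZN_STPRD_FRNR_LVLH_POPNO", "17시_외국인_상주생활인구수"),
   ("SVNTN_TIZN_STPRD_FRNR_VST_POPNO", "17시_외국인_방문생활인구수"),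
   ("EGHTN_TIZN_STPRD_FRNR_LVLH_POPNO", "18시_외국인_상주생활인구수"),
   ("EGHTN_TIZN_STPRD_FRNR_VST_POPNO", "18시_외국인_방문생활인구수"),
   ("NNTN_TIZN_STPRD_FRNR_LVLH_POPNO", "19시_외국인_상주생활인구수"),
   ("NNTN_TIZN_STPRD_FRNR_VST_POPNO", "19시_외국인_방문생활인구수"),
   ("TWNT_TIZN_STPRD_FRNR_LVLH_POPNO", "20시_외국인_상주생활인구수"),
   ("TWNT_TIZN_STPRD_FRNR_VST_POPNO", "20시_외국인_방문생활인구수"),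
   ("TNT_TIZN_STPRD_FRNR_LVLH_POPNO", "20시_외국인_상주생활인구수"),
   ("TNT_TIZN_STPRD_FRNR_VST_POPNO", "20시_외국인_방문생활인구수"),
   ("TNONE_TIZN_STPRD_FRNR_LVLH_POPNO", "21시_외국인_상주생활인구수"),
   ("TNONE_TIZN_STPRD_FRNR_VST_POPNO", "21시_외국인_방문생활인구수"),
   ("TNTONE_TIZN_STPRD_FRNR_LVLH_POPNO", "21시_외국인_상주생활인구수"),
   ("TNTONE_TIZN_STPRD_FRNR_VST_POPNO", "21시_외국인_방문생활인구수"),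
   ("TNTT_TIZN_STPRD_FRNR_LVLH_POPNO", "22시_외국인_상주생활인구수"),
   ("TNTT_TIZN_STPRD_FRNR_VST_POPNO", "22시_외국인_방문생활인구수"),
   ("TNTTH_TIZN_STPRD_FRNR_LVLH_POPNO", "23시_외국인_상주생활인구수"),
   ("TNTTH_TIZN_STPRD_FRNR_VST_POPNO", "23시_외국인_방문생활인구수")]

def RENAME : PySem.Dict String String := PySem.Dict.ofList RENAME_pairs

-- 'RENAME.get(col, col)'
def korean_name_alt (col : String) : String := RENAME.getD col col

-- ===== PRECONDITION & SPEC =====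
def Spec_korean_name (col : String) (out : String) : Prop := out = korean_name_alt col
instance (col : String) (out : String) : Decidable (Spec_korean_name col out) := by unfold Spec_korean_name; infer_instance

-- ===== CLAIM (what is proved, stated in full; the proofs are below) =====
def Claim_equal_korean_name : Prop := ∀ (col : String), Dom_korean_name col → Spec_korean_name col (korean_name col)

-- ===== LEMMAS AND PROOFS =====

-- the two generated entries per hour prefix
def expandHP : List (String × Int) → List (String × String)
  | [] => []
  | (p, h) :: rest =>
      (p ++ "_TIZN_STPRD_FRNR_LVLH_POPNO", fmt02 h ++ "시_외국인_상주생활인구수") ::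
      (p ++ "_TIZN_STPRD_FRNR_VST_POPNO", fmt02 h ++ "시_외국인_방문생활인구수") ::
      expandHP rest

lemma goA_eq_lookup (col : String) (r : List (String × Int)) :
    koreanGoA col r =
      (match (PySem.Dict.mk (expandHP r)).get? col with
       | some v => v
       | none => col) := by
  induction r with
  | nil => simp [koreanGoA, expandHP, PySem.Dict.get?]
  | cons hd tl ih =>
    obtain ⟨p, h⟩ := hd
    rw [koreanGoA, expandHP, PySem.Dict.get?_mk_cons, PySem.Dict.get?_mk_cons]
    by_cases h1 : col = p ++ "_TIZN_STPRD_FRNR_LVLH_POPNO"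
    · rw [if_pos h1,
        if_pos (show ((p ++ "_TIZN_STPRD_FRNR_LVLH_POPNO") == col) = true from
          beq_iff_eq.mpr h1.symm)]
    · rw [if_neg h1,
        if_neg (show ¬ ((p ++ "_TIZN_STPRD_FRNR_LVLH_POPNO") == col) = true from
          fun hc => h1 (beq_iff_eq.mp hc).symm)]
      by_cases h2 : col = p ++ "_TIZN_STPRD_FRNR_VST_POPNO"
      · rw [if_pos h2,
          if_pos (show ((p ++ "_TIZN_STPRD_FRNR_VST_POPNO") == col) = true from
            beq_iff_eq.mpr h2.symm)]
      · rw [if_neg h2,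
          if_neg (show ¬ ((p ++ "_TIZN_STPRD_FRNR_VST_POPNO") == col) = true from
            fun hc => h2 (beq_iff_eq.mp hc).symm)]
        exact ih

lemma get?_mk_append {ν : Type} (l1 l2 : List (String × ν)) (k : String) :
    (PySem.Dict.mk (l1 ++ l2)).get? k =
      (match (PySem.Dict.mk l1).get? k with
       | some v => some v
       | none => (PySem.Dict.mk l2).get? k) := by
  induction l1 with
  | nil => simp [PySem.Dict.get?]
  | cons hd tl ih =>
    obtain ⟨a, b⟩ := hd
    rw [List.cons_append, PySem.Dict.get?_mk_cons, PySem.Dict.get?_mk_cons]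
    by_cases h : (a == k) = true
    · rw [if_pos h, if_pos h]
    · rw [if_neg h, if_neg h]; exact ih

set_option maxRecDepth 20000 in
lemma rename_split :
    RENAME = PySem.Dict.mk (BASE_RENAME.items ++ expandHP hourPrefixItems) := by decide

lemma base_mk : BASE_RENAME = PySem.Dict.mk BASE_RENAME.items := by decide

lemma hour_items : HOUR_PREFIX.items = hourPrefixItems := by decide

lemma getD_eq_get? {κ ν : Type} [BEq κ] (d : PySem.Dict κ ν) (k : κ) (dflt : ν) :
    d.getD k dflt = (d.get? k).getD dflt := rfl

-- ===== VERDICT (by name: the statement is the Claim_ definition above) =====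
theorem korean_name_spec : Claim_equal_korean_name := by
  intro col _
  unfold Spec_korean_name korean_name korean_name_alt
  rw [getD_eq_get?, rename_split, get?_mk_append, ← base_mk, hour_items]
  cases hbase : BASE_RENAME.get? col with
  | some v => rfl
  | none =>
    rw [goA_eq_lookup]
    cases (PySem.Dict.mk (expandHP hourPrefixItems)).get? col <;> rfl
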